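-- pv_equiv track=rewrite | github.com/VVKot/coding-competitions | leetcode/python/54_spiral_matrix.py | get_nodes_in_spiral
-- ===== SOURCE A (Python) =====
-- from typing import Generator, List, Tuple
--
-- def get_nodes_in_spiral(
--                         y1: int,
--                         x1: int,
--                         y2: int,
--                         x2: int) -> Generator[Tuple[int, int], None, None]:
--     for x in range(x1, x2+1):
--         yield y1, x
--     for y in range(y1+1, y2+1):
--         yield y, x2
--     if y1 < y2 and x1 < x2:
--         for x in reversed(range(x1+1, x2)):
--             yield y2, x
--         for y in reversed(range(y1+1, y2+1)):
--             yield y, x1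
-- ===== SOURCE B (Python) =====
-- def get_nodes_in_spiral(y1, x1, y2, x2):
--     # Closed-form: compute the four segment lengths once, then map each index
--     # k of a single range onto its boundary coordinate by arithmetic.
--     w = x2 - x1 + 1
--     h = y2 - y1 + 1
--     top = w if w > 0 else 0
--     right = h - 1 if h > 1 else 0
--     inner = h > 1 and w > 1
--     bottom = w - 2 if inner else 0
--     left = h - 1 if inner else 0
--     for k in range(top + right + bottom + left):
--         if k < top:
--             yield y1, x1 + k
--         elif k < top + right:
--             yield y1 + 1 + (k - top), x2
--         elif k < top + right + bottom:
--             yield y2, x2 - 1 - (k - top - right)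
--         else:
--             yield y2 - (k - top - right - bottom), x1
-- ===== Notes on version B (the rewrite author's own statement) =====
-- stated objective: alternative
-- what changed: Replaces A's four separate edge loops (two forward, two reversed) by computing the four segment lengths up front and a single loop over one index range that maps each index to its boundary coordinate by arithmetic.
import Mathlib
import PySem

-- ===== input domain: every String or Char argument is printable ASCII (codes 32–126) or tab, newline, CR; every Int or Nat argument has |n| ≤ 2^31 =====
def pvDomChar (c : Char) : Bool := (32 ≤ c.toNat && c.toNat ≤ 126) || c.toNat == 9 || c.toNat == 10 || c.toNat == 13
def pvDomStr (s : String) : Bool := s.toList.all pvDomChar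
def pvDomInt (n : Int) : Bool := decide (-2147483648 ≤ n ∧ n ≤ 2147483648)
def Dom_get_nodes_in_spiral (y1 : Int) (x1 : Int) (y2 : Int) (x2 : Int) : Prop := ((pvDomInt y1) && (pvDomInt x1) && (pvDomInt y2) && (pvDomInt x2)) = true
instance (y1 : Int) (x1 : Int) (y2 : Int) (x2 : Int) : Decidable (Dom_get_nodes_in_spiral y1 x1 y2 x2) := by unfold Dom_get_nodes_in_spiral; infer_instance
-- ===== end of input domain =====

-- B replaces A's four separate edge loops by precomputed segment lengths and a single
-- index loop that maps each index to its boundary coordinate by arithmetic (alternative decomposition).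

-- ===== PORT A =====
def get_nodes_in_spiral (y1 : Int) (x1 : Int) (y2 : Int) (x2 : Int) : List (Int × Int) :=
  ((PySem.List.pyRange x1 (x2 + 1) 1).map (fun x => (y1, x)))
  ++ ((PySem.List.pyRange (y1 + 1) (y2 + 1) 1).map (fun y => (y, x2)))
  ++ (if y1 < y2 ∧ x1 < x2 then
        ((PySem.List.pyRange (x1 + 1) x2 1).reverse.map (fun x => (y2, x)))
        ++ ((PySem.List.pyRange (y1 + 1) (y2 + 1) 1).reverse.map (fun y => (y, x1)))
      else [])

-- ===== PORT B =====
def get_nodes_in_spiral_alt (y1 : Int) (x1 : Int) (y2 : Int) (x2 : Int) : List (Int × Int) :=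
  let w := x2 - x1 + 1
  let h := y2 - y1 + 1
  let top := if w > 0 then w else 0
  let right := if h > 1 then h - 1 else 0
  let bottom := if h > 1 ∧ w > 1 then w - 2 else 0
  let left := if h > 1 ∧ w > 1 then h - 1 else 0
  (PySem.List.pyRange 0 (top + right + bottom + left) 1).map (fun k =>
    if k < top then (y1, x1 + k)
    else if k < top + right then (y1 + 1 + (k - top), x2)
    else if k < top + right + bottom then (y2, x2 - 1 - (k - top - right))
    else (y2 - (k - top - right - bottom), x1))

-- ===== PRECONDITION & SPEC =====
def Spec_get_nodes_in_spiral (y1 : Int) (x1 : Int) (y2 : Int) (x2 : Int) (out : List (Int × Int)) : Prop := out = get_nodes_in_spiral_alt y1 x1 y2 x2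
instance (y1 : Int) (x1 : Int) (y2 : Int) (x2 : Int) (out : List (Int × Int)) : Decidable (Spec_get_nodes_in_spiral y1 x1 y2 x2 out) := by unfold Spec_get_nodes_in_spiral; infer_instance

-- ===== CLAIM (what is proved, stated in full; the proofs are below) =====
def Claim_equal_get_nodes_in_spiral : Prop := ∀ (y1 : Int) (x1 : Int) (y2 : Int) (x2 : Int), Dom_get_nodes_in_spiral y1 x1 y2 x2 → Spec_get_nodes_in_spiral y1 x1 y2 x2 (get_nodes_in_spiral y1 x1 y2 x2)

-- ===== LEMMAS AND PROOFS =====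

-- shift a unit-step range to start at 0
theorem map_pyRange_shift {α : Type} (f : Int → α) (a b : Int) :
    (PySem.List.pyRange a b 1).map f
      = (PySem.List.pyRange 0 (b - a) 1).map (fun k => f (a + k)) := by
  simp [PySem.List.pyRange_one, List.map_map, Function.comp]

-- a reversed unit-step range as a 0-based range walked downward
theorem map_rev_shift {α : Type} (f : Int → α) (a b : Int) :
    ((PySem.List.pyRange a b 1).reverse).map f
      = (PySem.List.pyRange 0 (b - a) 1).map (fun k => f (b - 1 - k)) := by
  have h := PySem.List.pyRange_neg_one_eq_reverse (b - 1) (a - 1)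
  rw [show a - 1 + 1 = a by ring, show b - 1 + 1 = b by ring] at h
  rw [← h]
  simp [PySem.List.pyRange_neg_one, PySem.List.pyRange_one, List.map_map, Function.comp]

-- two maps over unit ranges of equal length agree if they agree pointwise
theorem seg_eq {α : Type} (g g' : Int → α) (a b a' b' : Int) (hlen : b - a = b' - a')
    (h : ∀ k : Int, 0 ≤ k → k < b - a → g (a + k) = g' (a' + k)) :
    (PySem.List.pyRange a b 1).map g = (PySem.List.pyRange a' b' 1).map g' := by
  rw [map_pyRange_shift g, map_pyRange_shift g', hlen]
  apply List.map_congr_left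
  intro k hk
  rw [PySem.List.mem_pyRange_one] at hk
  exact h k hk.1 (by omega)

theorem AB_eq (y1 x1 y2 x2 : Int) :
    get_nodes_in_spiral y1 x1 y2 x2 = get_nodes_in_spiral_alt y1 x1 y2 x2 := by
  unfold get_nodes_in_spiral get_nodes_in_spiral_alt
  by_cases hy : y1 < y2
  · by_cases hx : x1 < x2
    · -- full rectangle: all four edges
      have hw : x2 - x1 + 1 > 0 := by omega
      have hw1 : x2 - x1 + 1 > 1 := by omega
      have hh : y2 - y1 + 1 > 1 := by omega
      simp only [eq_true hw, eq_true hw1, eq_true hh, eq_true hy, eq_true hx, and_self, if_true]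
      rw [PySem.List.pyRange_one_append 0 (x2 - x1 + 1)
          (x2 - x1 + 1 + (y2 - y1 + 1 - 1) + (x2 - x1 + 1 - 2) + (y2 - y1 + 1 - 1)) (by omega) (by omega),
        PySem.List.pyRange_one_append (x2 - x1 + 1) (x2 - x1 + 1 + (y2 - y1 + 1 - 1))
          (x2 - x1 + 1 + (y2 - y1 + 1 - 1) + (x2 - x1 + 1 - 2) + (y2 - y1 + 1 - 1)) (by omega) (by omega),
        PySem.List.pyRange_one_append (x2 - x1 + 1 + (y2 - y1 + 1 - 1))
          (x2 - x1 + 1 + (y2 - y1 + 1 - 1) + (x2 - x1 + 1 - 2))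
          (x2 - x1 + 1 + (y2 - y1 + 1 - 1) + (x2 - x1 + 1 - 2) + (y2 - y1 + 1 - 1)) (by omega) (by omega)]
      simp only [List.map_append, List.append_assoc]
      congr 1
      · exact seg_eq _ _ _ _ _ _ (by ring) (fun k hk0 hkL => by
          rw [if_pos (by omega)]
          refine Prod.ext ?_ ?_ <;> simp)
      congr 1
      · exact seg_eq _ _ _ _ _ _ (by ring) (fun k hk0 hkL => by
          rw [if_neg (by omega), if_pos (by omega)]
          refine Prod.ext ?_ ?_ <;> simp)
      congr 1
      · rw [map_rev_shift]
        exact seg_eq _ _ _ _ _ _ (by ring) (fun k hk0 hkL => by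
          rw [if_neg (by omega), if_neg (by omega), if_pos (by omega)]
          refine Prod.ext ?_ ?_ <;> simp <;> omega)
      · rw [map_rev_shift]
        exact seg_eq _ _ _ _ _ _ (by ring) (fun k hk0 hkL => by
          rw [if_neg (by omega), if_neg (by omega), if_neg (by omega)]
          refine Prod.ext ?_ ?_ <;> simp <;> omega)
    · -- y1 < y2 but x1 ≥ x2: top edge (if any) and right edge only
      have hh : y2 - y1 + 1 > 1 := by omega
      have hnw1 : ¬(x2 - x1 + 1 > 1) := by omega
      simp only [eq_true hh, eq_false hnw1, eq_false hx, and_false, if_false, if_true, List.append_nil, add_zero]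
      by_cases hx' : x1 ≤ x2
      · -- single column x1 = x2: top is one cell, then the right edge
        have hw : x2 - x1 + 1 > 0 := by omega
        simp only [eq_true hw, if_true]
        rw [PySem.List.pyRange_one_append 0 (x2 - x1 + 1)
            (x2 - x1 + 1 + (y2 - y1 + 1 - 1)) (by omega) (by omega)]
        simp only [List.map_append]
        congr 1
        · exact seg_eq _ _ _ _ _ _ (by ring) (fun k hk0 hkL => by
            rw [if_pos (by omega)]
            refine Prod.ext ?_ ?_ <;> simp)
        · exact seg_eq _ _ _ _ _ _ (by ring) (fun k hk0 hkL => by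
            rw [if_neg (by omega), if_pos (by omega)]
            refine Prod.ext ?_ ?_ <;> simp)
      · -- empty width: A's top range is empty, only the right edge remains
        have hnw : ¬(x2 - x1 + 1 > 0) := by omega
        simp only [eq_false hnw, if_false]
        rw [PySem.List.pyRange_one_eq_nil (a := x1) (b := x2 + 1) (by omega)]
        simp only [List.map_nil, List.nil_append, zero_add]
        exact seg_eq _ _ _ _ _ _ (by ring) (fun k hk0 hkL => by
          rw [if_neg (by omega), if_pos (by omega)]
          refine Prod.ext ?_ ?_ <;> simp)
  · -- y1 ≥ y2: no right/bottom/left edges; at most the top row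
    have hnh : ¬(y2 - y1 + 1 > 1) := by omega
    have hna : ¬(y1 < y2 ∧ x1 < x2) := by omega
    simp only [eq_false hnh, eq_false hna, false_and, if_false, List.append_nil, add_zero]
    rw [PySem.List.pyRange_one_eq_nil (a := y1 + 1) (b := y2 + 1) (by omega)]
    simp only [List.map_nil, List.append_nil]
    by_cases hx' : x1 ≤ x2
    · have hw : x2 - x1 + 1 > 0 := by omega
      simp only [eq_true hw, if_true]
      exact seg_eq _ _ _ _ _ _ (by ring) (fun k hk0 hkL => by
        rw [if_pos (by omega)]
        refine Prod.ext ?_ ?_ <;> simp)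
    · have hnw : ¬(x2 - x1 + 1 > 0) := by omega
      simp only [eq_false hnw, if_false]
      rw [PySem.List.pyRange_one_eq_nil (a := x1) (b := x2 + 1) (by omega),
        PySem.List.pyRange_one_eq_nil (a := 0) (b := 0) (by omega)]
      simp

-- ===== VERDICT (by name: the statement is the Claim_ definition above) =====
theorem get_nodes_in_spiral_spec : Claim_equal_get_nodes_in_spiral := by
  intro y1 x1 y2 x2 _
  exact AB_eq y1 x1 y2 x2
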